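-- pv_equiv track=rewrite | github.com/dyllonj/Nyx | server.py | _parse_coach_sections
-- ===== SOURCE A (Python) =====
-- def _parse_coach_sections(text: str) -> tuple[str, list[str], str]:
--     verdict = ""
--     evidence: list[str] = []
--     next_step = ""
--     section = None
--
--     for raw_line in text.splitlines():
--         line = raw_line.strip()
--         if not line:
--             continue
--         lowered = line.lower()
--         if lowered.startswith("verdict:"):
--             section = "verdict"
--             verdict = line.split(":", 1)[1].strip()
--             continue
--         if lowered.startswith("evidence:"):
--             section = "evidence"
--             continue
--         if lowered.startswith("next step:"):
--             section = "next_step"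
--             next_step = line.split(":", 1)[1].strip()
--             continue
--
--         if section == "verdict":
--             verdict = f"{verdict} {line}".strip()
--         elif section == "evidence" and line[:1] in {"-", "*"}:
--             evidence.append(line[1:].strip())
--         elif section == "next_step":
--             next_step = f"{next_step} {line}".strip()
--
--     if not verdict:
--         verdict = text.strip()
--     return verdict, evidence, next_step
-- ===== SOURCE B (Python) =====
-- def _parse_coach_sections(text: str) -> tuple[str, list[str], str]:
--     # Pass 1: classify stripped, non-empty lines into per-section buckets.
--     buckets = {"verdict": [], "evidence": [], "next_step": []}
--     current = None
--     for raw in text.splitlines():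
--         line = raw.strip()
--         if not line:
--             continue
--         low = line.lower()
--         header = None
--         for prefix, name in (("verdict:", "verdict"), ("evidence:", "evidence"), ("next step:", "next_step")):
--             if low.startswith(prefix):
--                 header = name
--                 break
--         if header is not None:
--             current = header
--             if header != "evidence":
--                 # last header wins: reset the bucket with the inline text
--                 buckets[header] = [line.split(":", 1)[1].strip()]
--         elif current is not None:
--             buckets[current].append(line)
--     # Pass 2: render each bucket.
--     verdict = " ".join(buckets["verdict"]).strip()
--     evidence = [e[1:].strip() for e in buckets["evidence"] if e[:1] in ("-", "*")]
--     next_step = " ".join(buckets["next_step"]).strip()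
--     if not verdict:
--         verdict = text.strip()
--     return verdict, evidence, next_step
-- ===== Notes on version B (the rewrite author's own statement) =====
-- stated objective: alternative
-- what changed: B replaces A's single interleaved accumulation (mutating verdict/evidence/next_step while scanning) with a two-pass decomposition: pass 1 only classifies stripped lines into per-section buckets (last verdict/next-step header resets its bucket with the inline text), pass 2 renders each bucket (space-join+strip for verdict/next_step, filter-and-strip of '-'/'*' entries for evidence), then applies the verdict fallback.
import Mathlib
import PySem

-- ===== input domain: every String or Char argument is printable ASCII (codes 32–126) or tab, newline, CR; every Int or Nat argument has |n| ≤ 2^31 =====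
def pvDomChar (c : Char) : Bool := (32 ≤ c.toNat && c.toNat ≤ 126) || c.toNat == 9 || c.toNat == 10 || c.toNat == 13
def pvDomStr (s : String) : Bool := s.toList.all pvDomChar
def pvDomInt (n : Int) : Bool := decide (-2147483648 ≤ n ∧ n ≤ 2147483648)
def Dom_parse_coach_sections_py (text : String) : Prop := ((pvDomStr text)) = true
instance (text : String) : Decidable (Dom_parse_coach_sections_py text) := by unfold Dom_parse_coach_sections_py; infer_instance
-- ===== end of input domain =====

-- B re-parses the coach text in two passes (classify lines into per-section buckets, then render
-- each bucket) instead of A's single interleaved accumulation; same cost, alternative decomposition.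

-- shared helper: line.split(":", 1)[1].strip() — at every call site the line starts with a header
-- containing ':', so index 1 is always in range (the [] default is never used)
def pvAfterColon (line : List Char) : List Char :=
  PySem.Chars.strip (PySem.List.pyGetD (PySem.Chars.splitOnMax line [':'] 1) 1 [])

-- ===== PORT A =====
-- state: (verdict, evidence, next_step, section)
def pvAStep (st : List Char × List (List Char) × List Char × Option String) (raw : List Char) :
    List Char × List (List Char) × List Char × Option String :=
  let (v, ev, ns, sect) := st
  let line := PySem.Chars.strip raw
  if line = [] then (v, ev, ns, sect)
  else
    let low := PySem.Chars.lower line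
    if PySem.Chars.startswith low ("verdict:".toList) then
      (pvAfterColon line, ev, ns, some "verdict")
    else if PySem.Chars.startswith low ("evidence:".toList) then
      (v, ev, ns, some "evidence")
    else if PySem.Chars.startswith low ("next step:".toList) then
      (v, ev, pvAfterColon line, some "next_step")
    else if sect = some "verdict" then
      (PySem.Chars.strip (v ++ ' ' :: line), ev, ns, sect)
    else if sect = some "evidence" ∧
        (PySem.Chars.slice line none (some 1) = ['-'] ∨ PySem.Chars.slice line none (some 1) = ['*']) then
      (v, ev ++ [PySem.Chars.strip (PySem.Chars.slice line (some 1) none)], ns, sect)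
    else if sect = some "next_step" then
      (v, ev, PySem.Chars.strip (ns ++ ' ' :: line), sect)
    else (v, ev, ns, sect)

def parse_coach_sections_py (text : String) : String × List String × String :=
  let st := (PySem.Chars.splitlines text.toList).foldl pvAStep ([], [], [], none)
  let v := if st.1 = [] then PySem.Chars.strip text.toList else st.1
  (String.ofList v, st.2.1.map String.ofList, String.ofList st.2.2.1)

-- ===== PORT B =====
-- the header table of Source B's inner loop; the first match wins (List.find? = loop with break)
def pvHeaders : List (List Char × String) :=
  [("verdict:".toList, "verdict"), ("evidence:".toList, "evidence"), ("next step:".toList, "next_step")]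

-- pass 1 state: (current, buckets); the dict with the three fixed keys "verdict"/"evidence"/"next_step"
-- is held as three lists, written/appended by key dispatch
def pvBStep (st : Option String × List (List Char) × List (List Char) × List (List Char))
    (raw : List Char) : Option String × List (List Char) × List (List Char) × List (List Char) :=
  let (cur, bv, be, bn) := st
  let line := PySem.Chars.strip raw
  if line = [] then (cur, bv, be, bn)
  else
    let low := PySem.Chars.lower line
    match pvHeaders.find? (fun pn => PySem.Chars.startswith low pn.1) with
    | some (_, name) =>
      if name = "verdict" then (some name, [pvAfterColon line], be, bn)
      else if name = "next_step" then (some name, bv, be, [pvAfterColon line])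
      else (some name, bv, be, bn)
    | none =>
      match cur with
      | some c =>
        if c = "verdict" then (cur, bv ++ [line], be, bn)
        else if c = "evidence" then (cur, bv, be ++ [line], bn)
        else (cur, bv, be, bn ++ [line])
      | none => (cur, bv, be, bn)

-- pass 2 renderers: " ".join(bucket).strip() and the evidence list comprehension
def pvSpaceJoin (l : List (List Char)) : List Char :=
  PySem.Chars.strip (PySem.Chars.join [' '] l)

def pvEvRender (be : List (List Char)) : List (List Char) :=
  (be.filter (fun e => PySem.Chars.slice e none (some 1) = ['-'] ∨
      PySem.Chars.slice e none (some 1) = ['*'])).map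
    (fun e => PySem.Chars.strip (PySem.Chars.slice e (some 1) none))

def parse_coach_sections_py_alt (text : String) : String × List String × String :=
  let st := (PySem.Chars.splitlines text.toList).foldl pvBStep (none, [], [], [])
  let verdict := pvSpaceJoin st.2.1
  let evidence := pvEvRender st.2.2.1
  let next_step := pvSpaceJoin st.2.2.2
  let verdict := if verdict = [] then PySem.Chars.strip text.toList else verdict
  (String.ofList verdict, evidence.map String.ofList, String.ofList next_step)

-- ===== PRECONDITION & SPEC =====
def Spec_parse_coach_sections_py (text : String) (out : String × List String × String) : Prop := out = parse_coach_sections_py_alt text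
instance (text : String) (out : String × List String × String) : Decidable (Spec_parse_coach_sections_py text out) := by unfold Spec_parse_coach_sections_py; infer_instance

-- ===== CLAIM (what is proved, stated in full; the proofs are below) =====
def Claim_equal_parse_coach_sections_py : Prop := ∀ (text : String), Dom_parse_coach_sections_py text → Spec_parse_coach_sections_py text (parse_coach_sections_py text)

-- ===== LEMMAS AND PROOFS =====

-- A's verdict/next_step accumulator step, and A's section value as a function of B's bucket
def pvAcc (a x : List Char) : List Char := PySem.Chars.strip (a ++ ' ' :: x)

def pvF (l : List (List Char)) : List Char := l.foldl pvAcc []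

def pvStripped (cs : List Char) : Prop := PySem.Chars.strip cs = cs

-- bucket well-formedness: every entry stripped, every entry after the first non-empty
def pvInv (l : List (List Char)) : Prop :=
  (∀ x ∈ l, pvStripped x) ∧ (∀ x ∈ l.tail, x ≠ [])

-- B's current-section marker only ever holds one of the three section names
def pvCurOK (cur : Option String) : Prop :=
  cur = none ∨ cur = some "verdict" ∨ cur = some "evidence" ∨ cur = some "next_step"

-- the simulation relation between A's state and B's pass-1 state
def pvRel (sa : List Char × List (List Char) × List Char × Option String)
    (sb : Option String × List (List Char) × List (List Char) × List (List Char)) : Prop :=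
  sa.2.2.2 = sb.1 ∧ sa.1 = pvF sb.2.1 ∧ sa.2.2.1 = pvF sb.2.2.2 ∧
  sa.2.1 = pvEvRender sb.2.2.1 ∧ pvInv sb.2.1 ∧ pvInv sb.2.2.2 ∧ pvCurOK sb.1

theorem pv_dropWhile_append_self {p : Char → Bool} {x : List Char} (z : List Char)
    (h : List.dropWhile p x = x) (hx : x ≠ []) :
    List.dropWhile p (x ++ z) = x ++ z := by
  have h0 : 0 < x.length := List.length_pos_iff.mpr hx
  rw [List.dropWhile_eq_self_iff] at h ⊢
  intro hl
  rw [List.getElem_append_left h0]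
  exact h h0

theorem pv_lstrip_eq_self_of_prefix {a l : List Char} (hp : a <+: l)
    (h : PySem.Chars.lstrip l = l) : PySem.Chars.lstrip a = a := by
  unfold PySem.Chars.lstrip at *
  rw [List.dropWhile_eq_self_iff] at h ⊢
  intro hl
  rw [hp.getElem hl]
  exact h (lt_of_lt_of_le hl hp.length_le)

theorem pv_rstrip_prefix (l : List Char) : PySem.Chars.rstrip l <+: l := by
  unfold PySem.Chars.rstrip
  have : List.dropWhile PySem.Chars.isspace l.reverse <:+ l.reverse := List.dropWhile_suffix _
  have := List.reverse_prefix.mpr (by simpa using this)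
  simpa using this

theorem pv_rstrip_idem (l : List Char) :
    PySem.Chars.rstrip (PySem.Chars.rstrip l) = PySem.Chars.rstrip l := by
  unfold PySem.Chars.rstrip
  rw [List.reverse_reverse, List.dropWhile_idempotent]

theorem pv_strip_idem (u : List Char) : pvStripped (PySem.Chars.strip u) := by
  unfold pvStripped PySem.Chars.strip
  rw [pv_lstrip_eq_self_of_prefix (pv_rstrip_prefix _) (by
      unfold PySem.Chars.lstrip; rw [List.dropWhile_idempotent]), pv_rstrip_idem]

theorem pv_stripped_parts {a : List Char} (h : pvStripped a) :
    PySem.Chars.lstrip a = a ∧ PySem.Chars.rstrip a = a := by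
  unfold pvStripped PySem.Chars.strip at h
  have hpre : PySem.Chars.rstrip (PySem.Chars.lstrip a) <+: PySem.Chars.lstrip a :=
    pv_rstrip_prefix _
  have hsuf : PySem.Chars.lstrip a <:+ a := List.dropWhile_suffix _
  have h1 : PySem.Chars.lstrip a = a := by
    have hlen : a.length ≤ (PySem.Chars.lstrip a).length := by
      calc a.length = (PySem.Chars.rstrip (PySem.Chars.lstrip a)).length := by rw [h]
        _ ≤ _ := hpre.length_le
    exact hsuf.eq_of_length (le_antisymm hsuf.length_le hlen)
  rw [h1] at h
  exact ⟨h1, h⟩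

theorem pv_strip_sep (a y : List Char) (ha : pvStripped a) (ha0 : a ≠ []) (hy : pvStripped y)
    (hy0 : y ≠ []) : PySem.Chars.strip (a ++ ' ' :: y) = a ++ ' ' :: y := by
  obtain ⟨hal, _⟩ := pv_stripped_parts ha
  obtain ⟨_, hyr⟩ := pv_stripped_parts hy
  have hyr' : List.dropWhile PySem.Chars.isspace y.reverse = y.reverse := by
    have := congrArg List.reverse hyr
    simpa [PySem.Chars.rstrip] using this
  unfold PySem.Chars.strip PySem.Chars.lstrip PySem.Chars.rstrip
  rw [pv_dropWhile_append_self (' ' :: y) hal ha0]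
  rw [show (a ++ ' ' :: y).reverse = y.reverse ++ (' ' :: a.reverse) by simp]
  rw [pv_dropWhile_append_self (' ' :: a.reverse) hyr' (by simpa using hy0)]
  simp

theorem pv_strip_cons_isspace (c : Char) (u : List Char) (h : PySem.Chars.isspace c = true) :
    PySem.Chars.strip (c :: u) = PySem.Chars.strip u := by
  simp [PySem.Chars.strip, PySem.Chars.lstrip, List.dropWhile, h]

theorem pv_acc_nil (y : List Char) (hy : pvStripped y) : pvAcc [] y = y := by
  have h : PySem.Chars.isspace ' ' = true := by decide
  simpa [pvAcc, pv_strip_cons_isspace _ _ h] using hy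

theorem pv_after_stripped (line : List Char) : pvStripped (pvAfterColon line) := by
  unfold pvAfterColon
  exact pv_strip_idem _

theorem pv_trail (t : List (List Char)) (h : List Char) :
    PySem.Chars.join [' '] (h :: t) = h ++ (t.map (' ' :: ·)).flatten := by
  induction t generalizing h with
  | nil => simp [PySem.Chars.join, List.intercalate]
  | cons y t' ih =>
    rw [show PySem.Chars.join [' '] (h :: y :: t') = h ++ [' '] ++ PySem.Chars.join [' '] (y :: t')
      from by simp [PySem.Chars.join, List.intercalate, List.intersperse]]
    rw [ih y]; simp

theorem pv_M (t : List (List Char)) (a : List Char) (ha : pvStripped a)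
    (ht : ∀ x ∈ t, pvStripped x ∧ x ≠ []) :
    t.foldl pvAcc a = PySem.Chars.strip (a ++ (t.map (' ' :: ·)).flatten) := by
  induction t generalizing a with
  | nil => simpa using ha.symm
  | cons y t' ih =>
    obtain ⟨hy, hy0⟩ := ht y (by simp)
    have ht' : ∀ x ∈ t', pvStripped x ∧ x ≠ [] := fun x hx => ht x (by simp [hx])
    by_cases ha0 : a = []
    · subst ha0
      rw [List.foldl_cons, pv_acc_nil y hy, ih y hy ht']
      have h : PySem.Chars.isspace ' ' = true := by decide
      simp [pv_strip_cons_isspace _ _ h]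
    · rw [List.foldl_cons, show pvAcc a y = a ++ ' ' :: y from pv_strip_sep a y ha ha0 hy hy0,
        ih _ (pv_strip_sep a y ha ha0 hy hy0) ht']
      simp

theorem pv_F_eq_join (l : List (List Char)) (h : pvInv l) : pvF l = pvSpaceJoin l := by
  obtain ⟨h1, h2⟩ := h
  cases l with
  | nil => simp [pvF, pvSpaceJoin, PySem.Chars.join, List.intercalate, PySem.Chars.strip,
      PySem.Chars.lstrip, PySem.Chars.rstrip]
  | cons h t =>
    have hh : pvStripped h := h1 h (by simp)
    rw [pvF, List.foldl_cons, pv_acc_nil h hh, pvSpaceJoin, pv_trail,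
      pv_M t h hh (fun x hx => ⟨h1 x (by simp [hx]), h2 x (by simpa using hx)⟩)]

theorem pv_inv_nil : pvInv [] := by simp [pvInv]

theorem pv_inv_singleton {x : List Char} (hx : pvStripped x) : pvInv [x] := by
  simp [pvInv, hx]

theorem pv_inv_append {l : List (List Char)} {x : List Char} (h : pvInv l) (hx : pvStripped x)
    (hx0 : x ≠ []) : pvInv (l ++ [x]) := by
  obtain ⟨h1, h2⟩ := h
  constructor
  · intro y hy
    rcases List.mem_append.mp hy with hy | hy
    · exact h1 y hy
    · rw [List.mem_singleton.mp hy]; exact hx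
  · intro y hy
    cases l with
    | nil => simp at hy
    | cons a t =>
      simp only [List.cons_append, List.tail_cons] at hy
      rcases List.mem_append.mp hy with hy' | hy'
      · exact h2 y hy'
      · rw [List.mem_singleton.mp hy']; exact hx0

theorem pv_F_append (l : List (List Char)) (x : List Char) :
    pvF (l ++ [x]) = pvAcc (pvF l) x := by
  simp [pvF, List.foldl_append]

theorem pv_F_singleton (x : List Char) (hx : pvStripped x) : pvF [x] = x := by
  simp [pvF, pv_acc_nil x hx]

-- one line preserves the simulation relation
theorem pv_step (sa : List Char × List (List Char) × List Char × Option String)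
    (sb : Option String × List (List Char) × List (List Char) × List (List Char))
    (h : pvRel sa sb) (raw : List Char) : pvRel (pvAStep sa raw) (pvBStep sb raw) := by
  obtain ⟨v, ev, ns, sect⟩ := sa
  obtain ⟨cur, bv, be, bn⟩ := sb
  obtain ⟨hs, hv, hn, he, hiv, hin, hok⟩ := h
  simp only at hs hv hn he
  subst hs hv hn he
  unfold pvAStep pvBStep
  dsimp only
  by_cases h0 : PySem.Chars.strip raw = []
  · rw [if_pos h0, if_pos h0]
    exact ⟨rfl, rfl, rfl, rfl, hiv, hin, hok⟩
  · have hline : pvStripped (PySem.Chars.strip raw) := pv_strip_idem raw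
    rw [if_neg h0, if_neg h0]
    by_cases hb1 : PySem.Chars.startswith (PySem.Chars.lower (PySem.Chars.strip raw))
        ("verdict:".toList) = true
    · simp only [pvHeaders, List.find?, hb1, if_true]
      exact ⟨rfl, (pv_F_singleton _ (pv_after_stripped _)).symm, rfl, rfl,
        pv_inv_singleton (pv_after_stripped _), hin, Or.inr (Or.inl rfl)⟩
    · have hb1' : PySem.Chars.startswith (PySem.Chars.lower (PySem.Chars.strip raw))
          ("verdict:".toList) = false := by simpa using hb1
      by_cases hb2 : PySem.Chars.startswith (PySem.Chars.lower (PySem.Chars.strip raw))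
          ("evidence:".toList) = true
      · simp only [pvHeaders, List.find?, hb1', hb2, if_true, if_false, Bool.false_eq_true]
        exact ⟨rfl, rfl, rfl, rfl, hiv, hin, Or.inr (Or.inr (Or.inl rfl))⟩
      · have hb2' : PySem.Chars.startswith (PySem.Chars.lower (PySem.Chars.strip raw))
            ("evidence:".toList) = false := by simpa using hb2
        by_cases hb3 : PySem.Chars.startswith (PySem.Chars.lower (PySem.Chars.strip raw))
            ("next step:".toList) = true
        · simp only [pvHeaders, List.find?, hb1', hb2', hb3, if_true, if_false, Bool.false_eq_true]
          exact ⟨rfl, rfl, (pv_F_singleton _ (pv_after_stripped _)).symm, rfl, hiv,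
            pv_inv_singleton (pv_after_stripped _), Or.inr (Or.inr (Or.inr rfl))⟩
        · have hb3' : PySem.Chars.startswith (PySem.Chars.lower (PySem.Chars.strip raw))
              ("next step:".toList) = false := by simpa using hb3
          simp only [pvHeaders, List.find?, hb1', hb2', hb3', if_false, Bool.false_eq_true]
          rcases hok with hc | hc | hc | hc <;> subst hc
          · -- current section: none → both sides drop the line
            simp only [reduceCtorEq, false_and, if_false]
            exact ⟨rfl, rfl, rfl, rfl, hiv, hin, Or.inl rfl⟩
          · -- current section: verdict → A extends verdict, B appends to its bucket
            simp only [Option.some.injEq, reduceIte, String.reduceEq, false_and]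
            refine ⟨rfl, ?_, rfl, rfl, pv_inv_append hiv hline h0, hin, Or.inr (Or.inl rfl)⟩
            rw [pv_F_append]
            rfl
          · -- current section: evidence → A conditionally appends, B buckets then filters
            simp only [Option.some.injEq, reduceIte, String.reduceEq, true_and]
            by_cases hp : PySem.Chars.slice (PySem.Chars.strip raw) none (some 1) = ['-'] ∨
                PySem.Chars.slice (PySem.Chars.strip raw) none (some 1) = ['*']
            · rw [if_pos hp]
              refine ⟨rfl, rfl, rfl, ?_, hiv, hin, Or.inr (Or.inr (Or.inl rfl))⟩
              simp only [PySem.Chars.slice_eq_listSlice] at hp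
              rcases hp with hq | hq <;> simp [pvEvRender, hq]
            · rw [if_neg hp]
              refine ⟨rfl, rfl, rfl, ?_, hiv, hin, Or.inr (Or.inr (Or.inl rfl))⟩
              simp only [PySem.Chars.slice_eq_listSlice] at hp
              rw [not_or] at hp
              simp [pvEvRender, List.filter_append, hp.1, hp.2]
          · -- current section: next_step → A extends next_step, B appends to its bucket
            simp only [Option.some.injEq, reduceIte, String.reduceEq, false_and]
            refine ⟨rfl, rfl, ?_, rfl, hiv, pv_inv_append hin hline h0,
              Or.inr (Or.inr (Or.inr rfl))⟩
            rw [pv_F_append]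
            rfl

theorem pv_fold (lines : List (List Char))
    (sa : List Char × List (List Char) × List Char × Option String)
    (sb : Option String × List (List Char) × List (List Char) × List (List Char))
    (h : pvRel sa sb) : pvRel (lines.foldl pvAStep sa) (lines.foldl pvBStep sb) := by
  induction lines generalizing sa sb with
  | nil => exact h
  | cons x xs ih => exact ih _ _ (pv_step _ _ h x)

-- ===== VERDICT (by name: the statement is the Claim_ definition above) =====
theorem parse_coach_sections_py_spec : Claim_equal_parse_coach_sections_py := by
  intro text _
  unfold Spec_parse_coach_sections_py parse_coach_sections_py parse_coach_sections_py_alt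
  have h := pv_fold (PySem.Chars.splitlines text.toList) ([], [], [], none) (none, [], [], [])
    ⟨rfl, rfl, rfl, rfl, pv_inv_nil, pv_inv_nil, Or.inl rfl⟩
  obtain ⟨hs, hv, hn, he, hiv, hin, hok⟩ := h
  simp only [hv, hn, he, pv_F_eq_join _ hiv, pv_F_eq_join _ hin]
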